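-- pv_equiv track=rewrite | github.com/vzguille/scheduler_src | grid_gen.py | find_ensembles
-- ===== SOURCE A (Python) =====
-- def find_ensembles(n, m, current_ensemble=[], start=1):
--     """
--     Find all unique ensembles of integer numbers that sum up to n with a maximum length of m.
--
--     Args:
--     - n: the target sum
--     - m: the maximum length of the ensembles
--     - current_ensemble: the current ensemble being built
--     - start: the minimum value to start adding to the current ensemble
--
--     Returns:
--     - A list of lists, where each list is a unique ensemble of integers that sum up to n and has a maximum length of m.
--     """
--     ensembles = []
--
--     # Base case: If n is 0 and the current ensemble has length m, it's a valid solution.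
--     if n == 0 and len(current_ensemble) <= m:
--         ensembles.append(current_ensemble.copy())
--         return ensembles
--
--     # Recursive step: Try adding numbers from start to n to the current ensemble, with a maximum length of m.
--     for i in range(start, n + 1):
--         current_ensemble.append(i)
--         # Recursively find ensembles that sum up to n - i, with a maximum length of m, starting from i.
--         ensembles.extend(find_ensembles(n - i, m, current_ensemble, i))
--         current_ensemble.pop()  # Backtrack
--
--     return ensembles
-- ===== SOURCE B (Python) =====
-- def find_ensembles(n, m, current_ensemble=[], start=1):
--     """Pure rewrite: generate ascending-part suffixes with a two-argument helper
--     (no mutation/backtracking of the shared prefix), then prepend the prefix and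
--     filter by total length in one final comprehension."""
--     def _parts(rem, lo):
--         if rem == 0:
--             return [[]]
--         return [[i] + tail for i in range(lo, rem + 1) for tail in _parts(rem - i, i)]
--     prefix = len(current_ensemble)
--     return [current_ensemble + p for p in _parts(n, start) if prefix + len(p) <= m]
-- ===== Notes on version B (the rewrite author's own statement) =====
-- stated objective: simpler
-- what changed: Replaces A's mutate-append/pop backtracking recursion that threads (m, current_ensemble) through every call by a pure two-argument suffix generator over (remaining, floor), with the prefix prepended and the length bound applied once in a final comprehension.
import Mathlib
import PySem

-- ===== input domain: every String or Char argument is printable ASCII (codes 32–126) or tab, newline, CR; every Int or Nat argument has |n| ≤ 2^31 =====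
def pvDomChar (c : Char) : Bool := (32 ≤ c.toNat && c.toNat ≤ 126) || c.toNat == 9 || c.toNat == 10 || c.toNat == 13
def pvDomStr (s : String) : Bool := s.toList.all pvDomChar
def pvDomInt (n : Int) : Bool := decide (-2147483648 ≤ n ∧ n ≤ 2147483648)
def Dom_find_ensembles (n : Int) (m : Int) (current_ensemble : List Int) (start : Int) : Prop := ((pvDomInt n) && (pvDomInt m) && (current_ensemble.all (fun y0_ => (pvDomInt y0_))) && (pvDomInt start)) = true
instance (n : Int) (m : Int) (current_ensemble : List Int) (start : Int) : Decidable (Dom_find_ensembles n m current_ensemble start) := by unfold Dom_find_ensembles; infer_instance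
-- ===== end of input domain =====

-- B replaces A's mutate-and-backtrack recursion threading (m, prefix) by a pure two-argument
-- suffix generator plus one final filter/prepend comprehension (objective: simpler; not faster).

-- ===== PORT A =====
-- A's recursion, with a fuel counter that only makes the recursion structurally total;
-- on every input admitted by Pre_ the fuel n.toNat + 2 exceeds A's recursion depth.
def feA (fuel : Nat) (n : Int) (m : Int) (ce : List Int) (start : Int) : List (List Int) :=
  match fuel with
  | 0 => []
  | Nat.succ f =>
    if n = 0 ∧ (ce.length : Int) ≤ m then [ce]
    else (PySem.List.pyRange start (n + 1) 1).foldl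
          (fun acc i => acc ++ feA f (n - i) m (ce ++ [i]) i) []

def find_ensembles (n : Int) (m : Int) (current_ensemble : List Int) (start : Int) : List (List Int) :=
  feA (n.toNat + 2) n m current_ensemble start

-- ===== PORT B =====
-- B's pure helper _parts(rem, lo), with the same kind of fuel counter.
def feParts (fuel : Nat) (rem : Int) (lo : Int) : List (List Int) :=
  match fuel with
  | 0 => []
  | Nat.succ f =>
    if rem = 0 then [[]]
    else (PySem.List.pyRange lo (rem + 1) 1).flatMap
          (fun i => (feParts f (rem - i) i).map (fun tail => i :: tail))

def find_ensembles_alt (n : Int) (m : Int) (current_ensemble : List Int) (start : Int) : List (List Int) :=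
  ((feParts (n.toNat + 2) n start).filter
      (fun p => (current_ensemble.length : Int) + p.length ≤ m)).map
    (fun p => current_ensemble ++ p)

-- ===== PRECONDITION & SPEC =====
-- Pre_ excludes exactly the inputs on which the Python A recurses forever (RecursionError):
-- start ≤ 0 together with n ≥ start, except the immediate base case and the one-step case n = start ≤ -1.
def Pre_find_ensembles (n : Int) (m : Int) (current_ensemble : List Int) (start : Int) : Prop :=
  1 ≤ start ∨ n < start ∨ (n = 0 ∧ (current_ensemble.length : Int) ≤ m) ∨
    (n = start ∧ n ≤ -1 ∧ (current_ensemble.length : Int) + 1 ≤ m)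

instance (n : Int) (m : Int) (current_ensemble : List Int) (start : Int) : Decidable (Pre_find_ensembles n m current_ensemble start) := by unfold Pre_find_ensembles; infer_instance

def pvWitness_find_ensembles : Int × Int × List Int × Int := (4, 3, [], 1)

def Spec_find_ensembles (n : Int) (m : Int) (current_ensemble : List Int) (start : Int) (out : List (List Int)) : Prop := out = find_ensembles_alt n m current_ensemble start
instance (n : Int) (m : Int) (current_ensemble : List Int) (start : Int) (out : List (List Int)) : Decidable (Spec_find_ensembles n m current_ensemble start out) := by unfold Spec_find_ensembles; infer_instance

-- ===== CLAIM (what is proved, stated in full; the proofs are below) =====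
def Claim_equal_find_ensembles : Prop := ∀ (n : Int) (m : Int) (current_ensemble : List Int) (start : Int), Dom_find_ensembles n m current_ensemble start → Pre_find_ensembles n m current_ensemble start → Spec_find_ensembles n m current_ensemble start (find_ensembles n m current_ensemble start)

-- ===== LEMMAS AND PROOFS =====

-- The key invariant: with any fuel and a positive lower bound, A's recursion equals
-- "generate suffixes, filter by total length, prepend the prefix".
theorem feA_eq_parts (fuel : Nat) :
    ∀ (n m : Int) (ce : List Int) (start : Int), 1 ≤ start →
      feA fuel n m ce start =
        ((feParts fuel n start).filter (fun p => (ce.length : Int) + p.length ≤ m)).map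
          (fun p => ce ++ p) := by
  induction fuel with
  | zero => intro n m ce start _; simp [feA, feParts]
  | succ f ih =>
    intro n m ce start hstart
    by_cases hn : n = 0
    · subst hn
      by_cases hm : (ce.length : Int) ≤ m
      · simp [feA, feParts, hm]
      · simp [feA, feParts, hm, PySem.List.pyRange_one_eq_nil hstart]
    · simp only [feA, feParts, hn, false_and, if_false,
        PySem.List.foldl_append_eq_flatMap, List.nil_append,
        List.filter_flatMap, List.map_flatMap]
      apply List.flatMap_congr   -- pointwise over i ∈ range(start, n+1)
      intro i hi
      have hi1 : 1 ≤ i := le_trans hstart (PySem.List.mem_pyRange_one.mp hi).1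
      rw [ih (n - i) m (ce ++ [i]) i hi1]
      simp only [List.filter_map, List.map_map]
      have hfilt : ∀ p ∈ feParts f (n - i) i,
          (((fun p => decide ((ce.length : Int) + (p.length : Int) ≤ m)) ∘
              fun tail => i :: tail) p) =
          ((fun p => decide (((ce ++ [i]).length : Int) + (p.length : Int) ≤ m)) p) := by
        intro p _
        simp only [Function.comp_apply, List.length_cons, List.length_append, List.length_nil]
        exact decide_eq_decide.mpr (by push_cast; omega)
      rw [List.filter_congr hfilt]
      apply List.map_congr_left
      intro p _
      simp

-- ===== VERDICT (by name: the statement is the Claim_ definition above) =====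
theorem find_ensembles_spec : Claim_equal_find_ensembles := by
  intro n m ce start _ hpre
  unfold Spec_find_ensembles find_ensembles find_ensembles_alt
  by_cases hstart : 1 ≤ start
  · exact feA_eq_parts (n.toNat + 2) n m ce start hstart
  · rcases hpre with h | hlt | ⟨h0, hm⟩ | ⟨heq, hneg, hm⟩
    · exact absurd h hstart
    · -- start ≤ 0 and n < start : empty loop on both sides
      have hn0 : n ≠ 0 := by omega
      have hnil : PySem.List.pyRange start (n + 1) 1 = [] :=
        PySem.List.pyRange_one_eq_nil (by omega)
      have ht : n.toNat = 0 := by omega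
      simp [ht, feA, feParts, hn0, hnil]
    · -- n = 0 with a short enough prefix : immediate base case on both sides
      subst h0
      simp [feA, feParts, hm]
    · -- n = start ≤ -1 with room for one more part : the single partition [n]
      subst heq
      have ht : n.toNat = 0 := by omega
      have hsing : PySem.List.pyRange n (n + 1) 1 = [n] :=
        PySem.List.pyRange_one_singleton n
      have hn0 : n ≠ 0 := by omega
      simp [ht, feA, feParts, hn0, hsing, hm]
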